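-- pv_equiv track=rewrite | github.com/rizwan2004cs/Ai-lab | Exp- 6/monkey_banana_problem.py | monkey_banana_problem
-- ===== SOURCE A (Python) =====
-- from collections import deque
--
-- goal_state = (2, 2, True, True)
--
-- def get_successors(state):
--     successors = []
--     monkey_position, box_position, monkey_on_box, has_bananas = state
--
--     if has_bananas:
--         return successors
--
--     for new_position in range(3):
--         if new_position != monkey_position:
--             successors.append((new_position, box_position, False, False))
--
--     if not monkey_on_box:
--         for new_position in range(3):
--             if new_position != box_position and new_position == monkey_position:
--                 successors.append((new_position, new_position, False, False))
--
--     if monkey_position == box_position and not monkey_on_box: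
--         successors.append((monkey_position, box_position, True, False))
--
--     if monkey_position == box_position and monkey_on_box and monkey_position == goal_state[0]:
--         successors.append((monkey_position, box_position, True, True))
--
--     return successors
--
-- def monkey_banana_problem(initial_state, goal_state):
--     queue = deque([(initial_state, [])])
--     visited = set()
--
--     while queue:
--         current_state, actions = queue.popleft()
--
--         if current_state in visited:
--             continue
--
--         visited.add(current_state)
--
--         if current_state == goal_state:
--             return actions
--
--         for successor in get_successors(current_state):
--             queue.append((successor, actions + [successor]))
--
--     return None
-- ===== SOURCE B (Python) =====
-- from collections import deque
--
-- goal_state = (2, 2, True, True)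
--
-- def monkey_banana_problem(initial_state, goal_state):
--     def successors(state):
--         m, b, on, has = state
--         if has:
--             return []
--         res = [(p, b, False, False) for p in range(3) if p != m]
--         if not on:
--             res += [(p, p, False, False) for p in range(3) if p != b and p == m]
--         if m == b and not on:
--             res.append((m, b, True, False))
--         if m == b and on and m == 2:
--             res.append((m, b, True, True))
--         return res
--
--     queue = deque([initial_state])
--     came_from = {}
--     visited = set()
--     while queue:
--         s = queue.popleft()
--         if s in visited:
--             continue
--         visited.add(s)
--         if s == goal_state:
--             path = []
--             cur = s
--             while cur in came_from:
--                 path.append(cur)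
--                 cur = came_from[cur]
--             path.reverse()
--             return path
--         for nxt in successors(s):
--             if nxt not in came_from and nxt != initial_state:
--                 came_from[nxt] = s
--             queue.append(nxt)
--     return None
-- ===== Notes on version B (the rewrite author's own statement) =====
-- stated objective: alternative
-- what changed: B's BFS queue holds bare states instead of per-entry copies of the whole action list: a came_from parent map is recorded at first enqueue and the action sequence is reconstructed by walking parents backward only when the goal is dequeued.
import Mathlib
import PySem

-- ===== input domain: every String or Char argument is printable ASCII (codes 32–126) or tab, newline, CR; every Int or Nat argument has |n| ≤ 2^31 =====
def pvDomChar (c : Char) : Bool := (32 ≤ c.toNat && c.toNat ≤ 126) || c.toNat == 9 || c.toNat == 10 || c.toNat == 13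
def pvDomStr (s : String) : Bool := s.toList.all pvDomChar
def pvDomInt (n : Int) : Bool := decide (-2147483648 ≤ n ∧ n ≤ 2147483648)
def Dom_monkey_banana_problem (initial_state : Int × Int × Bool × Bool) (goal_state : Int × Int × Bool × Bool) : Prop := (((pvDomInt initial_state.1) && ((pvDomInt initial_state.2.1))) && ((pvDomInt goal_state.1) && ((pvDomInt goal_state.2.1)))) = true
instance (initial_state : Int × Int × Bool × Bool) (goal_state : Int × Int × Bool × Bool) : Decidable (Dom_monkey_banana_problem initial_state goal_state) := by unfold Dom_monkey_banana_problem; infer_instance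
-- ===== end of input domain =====

-- B replaces A's per-queue-entry action lists by a parent map (came_from) recorded at first
-- enqueue and reconstructs the path only at the goal; equal return value, lighter queue entries.

abbrev MBS : Type := Int × Int × Bool × Bool

-- ===== PORT A =====
-- module-level:  goal_state = (2, 2, True, True)  (get_successors reads THIS global, not the parameter)
def pvGlobalGoal : MBS := (2, 2, true, true)

def get_successors (state : MBS) : List MBS :=
  let monkey_position := state.1
  let box_position := state.2.1
  let monkey_on_box := state.2.2.1
  let has_bananas := state.2.2.2
  if has_bananas then []
  else
    -- for new_position in range(3): if new_position != monkey_position: successors.append(...)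
    let s1 := (PySem.List.pyRange 0 3 1).foldl
      (fun acc p => if p ≠ monkey_position then acc ++ [((p, box_position, false, false) : MBS)] else acc) []
    let s2 := if monkey_on_box = false then
        (PySem.List.pyRange 0 3 1).foldl
          (fun acc p => if p ≠ box_position ∧ p = monkey_position then acc ++ [((p, p, false, false) : MBS)] else acc) s1
      else s1
    let s3 := if monkey_position = box_position ∧ monkey_on_box = false then
        s2 ++ [(monkey_position, box_position, true, false)] else s2
    if monkey_position = box_position ∧ monkey_on_box = true ∧ monkey_position = pvGlobalGoal.1 then
      s3 ++ [(monkey_position, box_position, true, true)] else s3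

-- the while-loop; fuel only makes the loop total (the reachable state space is finite, ≤ 64
-- states, so ≤ a few hundred dequeues ever happen; 1000 is never exhausted on real runs)
def bfsA (goal : MBS) : Nat → List (MBS × List MBS) → PySem.Set MBS → Option (List MBS)
  | 0, _, _ => none
  | _ + 1, [], _ => none
  | fuel + 1, (current_state, actions) :: rest, visited =>
    if PySem.Set.contains visited current_state then
      bfsA goal fuel rest visited
    else
      let visited' := PySem.Set.add visited current_state
      if current_state = goal then some actions
      else
        bfsA goal fuel
          ((get_successors current_state).foldl
            (fun q successor => q ++ [(successor, actions ++ [successor])]) rest)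
          visited'

def monkey_banana_problem (initial_state : Int × Int × Bool × Bool) (goal_state : Int × Int × Bool × Bool) : Option (List (Int × Int × Bool × Bool)) :=
  bfsA goal_state 1000 [(initial_state, [])] PySem.Set.empty

-- ===== PORT B =====
def successors_alt (state : MBS) : List MBS :=
  let m := state.1
  let b := state.2.1
  let on := state.2.2.1
  let has := state.2.2.2
  if has then []
  else
    let res := ((PySem.List.pyRange 0 3 1).filter (fun p => p ≠ m)).map
      (fun p => ((p, b, false, false) : MBS))
    let res := if on = false then
        res ++ ((PySem.List.pyRange 0 3 1).filter (fun p => p ≠ b ∧ p = m)).map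
          (fun p => ((p, p, false, false) : MBS))
      else res
    let res := if m = b ∧ on = false then res ++ [(m, b, true, false)] else res
    if m = b ∧ on = true ∧ m = 2 then res ++ [(m, b, true, true)] else res

-- path reconstruction: while cur in came_from: path.append(cur); cur = came_from[cur]
-- fuel = size of came_from (the walk visits distinct keys, so this is never exhausted)
def walkBack (came : PySem.Dict MBS MBS) : Nat → MBS → List MBS → List MBS
  | 0, _, path => path
  | fuel + 1, cur, path =>
    match came.get? cur with
    | none => path
    | some p => walkBack came fuel p (path ++ [cur])

def bfsB (goal init : MBS) : Nat → List MBS → PySem.Dict MBS MBS → PySem.Set MBS → Option (List MBS)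
  | 0, _, _, _ => none
  | _ + 1, [], _, _ => none
  | fuel + 1, s :: rest, came, visited =>
    if PySem.Set.contains visited s then
      bfsB goal init fuel rest came visited
    else
      let visited' := PySem.Set.add visited s
      if s = goal then some ((walkBack came came.size s []).reverse)
      else
        let cq := (successors_alt s).foldl
          (fun (cq : PySem.Dict MBS MBS × List MBS) nxt =>
            (if ¬ cq.1.contains nxt ∧ nxt ≠ init then cq.1.insert nxt s else cq.1,
             cq.2 ++ [nxt]))
          (came, rest)
        bfsB goal init fuel cq.2 cq.1 visited'

def monkey_banana_problem_alt (initial_state : Int × Int × Bool × Bool) (goal_state : Int × Int × Bool × Bool) : Option (List (Int × Int × Bool × Bool)) :=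
  bfsB goal_state initial_state 1000 [initial_state] PySem.Dict.empty PySem.Set.empty

-- ===== PRECONDITION & SPEC =====
def Spec_monkey_banana_problem (initial_state : Int × Int × Bool × Bool) (goal_state : Int × Int × Bool × Bool) (out : Option (List (Int × Int × Bool × Bool))) : Prop := out = monkey_banana_problem_alt initial_state goal_state
instance (initial_state : Int × Int × Bool × Bool) (goal_state : Int × Int × Bool × Bool) (out : Option (List (Int × Int × Bool × Bool))) : Decidable (Spec_monkey_banana_problem initial_state goal_state out) := by unfold Spec_monkey_banana_problem; infer_instance

-- ===== CLAIM (what is proved, stated in full; the proofs are below) =====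
def Claim_equal_monkey_banana_problem : Prop := ∀ (initial_state : Int × Int × Bool × Bool) (goal_state : Int × Int × Bool × Bool), Dom_monkey_banana_problem initial_state goal_state → Spec_monkey_banana_problem initial_state goal_state (monkey_banana_problem initial_state goal_state)

-- ===== LEMMAS AND PROOFS =====

-- The two successor generators agree (loop-with-ifs vs filter/map comprehension).
lemma foldl_if1 (m b : Int) (acc : List MBS) :
    List.foldl (fun acc p => if p ≠ m then acc ++ [((p, b, false, false) : MBS)] else acc) acc (PySem.List.pyRange 0 3 1)
      = acc ++ ((PySem.List.pyRange 0 3 1).filter (fun p => p ≠ m)).map (fun p => ((p, b, false, false) : MBS)) := by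
  have := PySem.List.foldl_append_if (fun p => decide (p ≠ m)) (fun p => ((p, b, false, false) : MBS)) (PySem.List.pyRange 0 3 1) acc
  simpa using this

lemma foldl_if2 (m b : Int) (acc : List MBS) :
    List.foldl (fun acc p => if p ≠ b ∧ p = m then acc ++ [((p, p, false, false) : MBS)] else acc) acc (PySem.List.pyRange 0 3 1)
      = acc ++ ((PySem.List.pyRange 0 3 1).filter (fun p => p ≠ b ∧ p = m)).map (fun p => ((p, p, false, false) : MBS)) := by
  have := PySem.List.foldl_append_if (fun p => decide (p ≠ b ∧ p = m)) (fun p => ((p, p, false, false) : MBS)) (PySem.List.pyRange 0 3 1) acc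
  simpa using this

lemma succ_alt_eq (s : MBS) : successors_alt s = get_successors s := by
  obtain ⟨m, b, on, has⟩ := s
  simp only [successors_alt, get_successors, pvGlobalGoal, foldl_if1, foldl_if2,
    List.nil_append]

-- came_from chains: Chain came init s a means a is the path (excluding init, ending at s)
-- that walking came_from from s down to the root init spells out.
inductive Chain (came : PySem.Dict MBS MBS) (init : MBS) : MBS → List MBS → Prop
  | nil : Chain came init init []
  | cons {s p : MBS} {a : List MBS} :
      came.get? s = some p → Chain came init p a → Chain came init s (a ++ [s])

def GoodPath (came : PySem.Dict MBS MBS) (init s : MBS) (a : List MBS) : Prop :=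
  Chain came init s a ∧ a.Nodup ∧ ∀ x ∈ a, (came.get? x).isSome

lemma walk_eval (came : PySem.Dict MBS MBS) (init : MBS)
    (hinit : came.get? init = none) :
    ∀ {s a}, Chain came init s a → ∀ fuel, a.length ≤ fuel → ∀ acc,
      walkBack came fuel s acc = acc ++ a.reverse := by
  intro s a hc
  induction hc with
  | nil =>
    intro fuel _ acc
    cases fuel with
    | zero => simp [walkBack]
    | succ n => simp [walkBack, hinit]
  | cons hget _ ih =>
    rename_i s p a
    intro fuel hlen acc
    cases fuel with
    | zero => simp at hlen
    | succ n =>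
      simp only [walkBack, hget]
      rw [ih n (by simp at hlen; omega)]
      simp

-- single conditional-insert step used by B's enqueue loop (proof-side name)
def insStep (init s : MBS) (c : PySem.Dict MBS MBS) (x : MBS) : PySem.Dict MBS MBS :=
  if ¬ c.contains x ∧ x ≠ init then c.insert x s else c

def foldIns (init s : MBS) (succs : List MBS) (c : PySem.Dict MBS MBS) : PySem.Dict MBS MBS :=
  succs.foldl (insStep init s) c

lemma pair_foldl_eq (init s : MBS) (succs : List MBS) :
    ∀ (came : PySem.Dict MBS MBS) (q : List MBS),
    succs.foldl
      (fun (cq : PySem.Dict MBS MBS × List MBS) nxt =>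
        (if ¬ cq.1.contains nxt ∧ nxt ≠ init then cq.1.insert nxt s else cq.1,
         cq.2 ++ [nxt])) (came, q)
      = (foldIns init s succs came, q ++ succs) := by
  induction succs with
  | nil => intro came q; simp [foldIns]
  | cons y ys ih =>
    intro came q
    simp only [List.foldl_cons, foldIns, insStep] at *
    rw [ih]
    simp

lemma get?_insStep_of_get (init s x k v : MBS) (c : PySem.Dict MBS MBS)
    (h : c.get? k = some v) : (insStep init s c x).get? k = some v := by
  unfold insStep
  split
  · next hcond =>
    have hne : k ≠ x := by
      intro he; subst he
      have := hcond.1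
      rw [PySem.Dict.contains_eq_isSome_get?, h] at this
      simp at this
    rw [PySem.Dict.get?_insert_of_ne _ _ hne, h]
  · exact h

lemma get?_foldIns_of_get (init s k v : MBS) (succs : List MBS) :
    ∀ c : PySem.Dict MBS MBS, c.get? k = some v → (foldIns init s succs c).get? k = some v := by
  induction succs with
  | nil => intro c h; simpa [foldIns] using h
  | cons y ys ih =>
    intro c h
    simp only [foldIns, List.foldl_cons]
    exact ih _ (get?_insStep_of_get init s y k v c h)

lemma get?_foldIns_init (init s : MBS) (succs : List MBS) :
    ∀ c : PySem.Dict MBS MBS, c.get? init = none → (foldIns init s succs c).get? init = none := by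
  induction succs with
  | nil => intro c h; simpa [foldIns] using h
  | cons y ys ih =>
    intro c h
    simp only [foldIns, List.foldl_cons]
    apply ih
    unfold insStep
    split
    · next hcond => rw [PySem.Dict.get?_insert_of_ne _ _ (Ne.symm hcond.2)]; exact h
    · exact h

lemma contains_foldIns (init s k : MBS) (succs : List MBS) :
    ∀ c : PySem.Dict MBS MBS, (foldIns init s succs c).contains k = true →
      c.contains k = true ∨ k ∈ succs := by
  induction succs with
  | nil => intro c h; left; simpa [foldIns] using h
  | cons y ys ih =>
    intro c h
    simp only [foldIns, List.foldl_cons] at h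
    rcases ih _ h with h' | h'
    · unfold insStep at h'
      split at h'
      · rw [PySem.Dict.contains_insert] at h'
        rcases (by simpa using h' : k = y ∨ c.contains k = true) with he | hc
        · right; simp [he]
        · left; exact hc
      · left; exact h'
    · right; simp [h']

lemma get?_foldIns_new (init s x : MBS) (succs : List MBS) :
    ∀ c : PySem.Dict MBS MBS, x ∈ succs → c.contains x = false → x ≠ init →
      (foldIns init s succs c).get? x = some s := by
  induction succs with
  | nil => intro c h; simp at h
  | cons y ys ih =>
    intro c hmem hnc hni
    simp only [foldIns, List.foldl_cons]
    by_cases hxy : x = y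
    · subst hxy
      have : insStep init s c x = c.insert x s := by
        unfold insStep
        rw [if_pos ⟨by simp [hnc], hni⟩]
      rw [this]
      exact get?_foldIns_of_get init s x s ys _ (PySem.Dict.get?_insert_self _ _ _)
    · rcases List.mem_cons.mp hmem with he | hmem'
      · exact absurd he hxy
      · apply ih _ hmem' _ hni
        unfold insStep
        split
        · rw [PySem.Dict.contains_insert]
          simp [hxy, hnc]
        · exact hnc

lemma chain_foldIns (init s : MBS) (succs : List MBS) (c : PySem.Dict MBS MBS)
    {t : MBS} {a : List MBS} (h : Chain c init t a) :
    Chain (foldIns init s succs c) init t a := by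
  induction h with
  | nil => exact Chain.nil
  | cons hget _ ih =>
    exact Chain.cons (get?_foldIns_of_get init s _ _ succs c hget) ih

lemma goodpath_foldIns (init s : MBS) (succs : List MBS) (c : PySem.Dict MBS MBS)
    {t : MBS} {a : List MBS} (h : GoodPath c init t a) :
    GoodPath (foldIns init s succs c) init t a := by
  obtain ⟨hc, hnd, hk⟩ := h
  refine ⟨chain_foldIns init s succs c hc, hnd, ?_⟩
  intro x hx
  obtain ⟨v, hv⟩ := Option.isSome_iff_exists.mp (hk x hx)
  rw [get?_foldIns_of_get init s x v succs c hv]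
  simp

-- length of a good path is bounded by the dict size
lemma goodpath_len_le (came : PySem.Dict MBS MBS) (init s : MBS) (a : List MBS)
    (h : GoodPath came init s a) : a.length ≤ came.size := by
  obtain ⟨_, hand, hk⟩ := h
  have hsub : a ⊆ came.keys := by
    intro x hx
    have hsome := hk x hx
    by_contra hmem
    rw [(PySem.Dict.get?_eq_none_iff_not_mem_keys came x).mpr hmem] at hsome
    simp at hsome
  have hlen : a.length ≤ came.keys.length := by
    calc a.length = a.toFinset.card := (List.toFinset_card_of_nodup hand).symm
    _ ≤ came.keys.toFinset.card := Finset.card_le_card (by intro x hx; simp at *; exact hsub hx)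
    _ ≤ came.keys.length := came.keys.toFinset_card_le
  simpa [PySem.Dict.keys, PySem.Dict.size] using hlen

lemma bool_tf {b : Bool} (h1 : b = true) (h2 : b = false) : False := by simp [h1] at h2

lemma set_contains_add_of (v : PySem.Set MBS) (x k : MBS)
    (h : PySem.Set.contains v k = true) : PySem.Set.contains (PySem.Set.add v x) k = true := by
  simp [PySem.Set.contains, PySem.Set.add] at *
  split <;> simp_all

lemma set_contains_add_self (v : PySem.Set MBS) (x : MBS) :
    PySem.Set.contains (PySem.Set.add v x) x = true := by
  simp only [PySem.Set.contains, PySem.Set.add]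
  split <;> simp_all

-- the main lock-step invariant lemma
lemma bfs_eq (goal init : MBS) :
    ∀ (fuel : Nat) (qa : List (MBS × List MBS)) (came : PySem.Dict MBS MBS)
      (visited : PySem.Set MBS),
    came.get? init = none →
    (∀ k : MBS, came.contains k = true →
      PySem.Set.contains visited k = true ∨ k ∈ qa.map Prod.fst) →
    (PySem.Set.contains visited init = true ∨ init ∈ qa.map Prod.fst) →
    (∀ i (hi : i < qa.length),
      PySem.Set.contains visited (qa[i]'hi).1 = false →
      (∀ j (hj : j < qa.length), j < i → (qa[j]'hj).1 ≠ (qa[i]'hi).1) →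
      GoodPath came init (qa[i]'hi).1 (qa[i]'hi).2) →
    bfsA goal fuel qa visited = bfsB goal init fuel (qa.map Prod.fst) came visited := by
  intro fuel
  induction fuel with
  | zero => intro qa came visited _ _ _ _; simp [bfsA, bfsB]
  | succ n ih =>
    intro qa came visited hinit hkeys hinitq hent
    cases qa with
    | nil => simp [bfsA, bfsB]
    | cons hd rest =>
      obtain ⟨s, a⟩ := hd
      simp only [List.map_cons, bfsA, bfsB]
      by_cases hv : PySem.Set.contains visited s = true
      · rw [if_pos hv, if_pos hv]
        apply ih rest came visited hinit
        · intro k hk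
          rcases hkeys k hk with h | h
          · exact Or.inl h
          · rcases List.mem_cons.mp h with he | h
            · exact Or.inl (he ▸ hv)
            · exact Or.inr h
        · rcases hinitq with h | h
          · exact Or.inl h
          · rcases List.mem_cons.mp h with he | h
            · exact Or.inl (he ▸ hv)
            · exact Or.inr h
        · intro i hi hnv hjlt
          have := hent (i + 1) (by simpa using Nat.succ_lt_succ hi) (by simpa using hnv) ?_
          · simpa using this
          · intro j hj hji
            cases j with
            | zero =>
              simp only [List.getElem_cons_zero, List.getElem_cons_succ]
              intro he
              rw [he] at hv
              rw [hv] at hnv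
              exact absurd hnv (by simp)
            | succ j' =>
              have := hjlt j' (by simpa using Nat.lt_of_succ_lt_succ hj) (Nat.lt_of_succ_lt_succ hji)
              simpa using this
      · rw [if_neg hv, if_neg hv]
        by_cases hg : s = goal
        · rw [if_pos hg, if_pos hg]
          have hgp : GoodPath came init s a := by
            have := hent 0 (by simp) (by simpa using (by simpa using hv)) (by intro j hj hji; omega)
            simpa using this
          rw [walk_eval came init hinit hgp.1 came.size (goodpath_len_le came init s a hgp) []]
          simp
        · rw [if_neg hg, if_neg hg]
          have hgp : GoodPath came init s a := by
            have := hent 0 (by simp) (by simpa using hv) (by intro j hj hji; omega)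
            simpa using this
          rw [succ_alt_eq s, pair_foldl_eq init s (get_successors s) came (rest.map Prod.fst)]
          rw [PySem.List.foldl_append_singleton_eq_map (fun x => ((x, a ++ [x]) : MBS × List MBS)) (get_successors s) rest]
          have hmap : (rest ++ (get_successors s).map (fun x => ((x, a ++ [x]) : MBS × List MBS))).map Prod.fst
              = rest.map Prod.fst ++ get_successors s := by
            simp only [List.map_append, List.map_map]
            rw [show (Prod.fst ∘ fun x => ((x, a ++ [x]) : MBS × List MBS)) = id from rfl, List.map_id]
          rw [← hmap]
          apply ih (rest ++ (get_successors s).map (fun x => ((x, a ++ [x]) : MBS × List MBS)))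
            (foldIns init s (get_successors s) came) (PySem.Set.add visited s)
          · exact get?_foldIns_init init s _ came hinit
          · intro k hk
            rcases contains_foldIns init s k _ came hk with hc | hm
            · rcases hkeys k hc with h | h
              · exact Or.inl (set_contains_add_of visited s k h)
              · rcases List.mem_cons.mp h with he | h
                · exact Or.inl (he ▸ set_contains_add_self visited s)
                · rw [hmap]; exact Or.inr (List.mem_append_left _ h)
            · rw [hmap]; exact Or.inr (List.mem_append_right _ hm)
          · rcases hinitq with h | h
            · exact Or.inl (set_contains_add_of visited s init h)
            · rcases List.mem_cons.mp h with he | h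
              · exact Or.inl (he ▸ set_contains_add_self visited s)
              · rw [hmap]; exact Or.inr (List.mem_append_left _ h)
          · intro i hi hnv hjdup
            by_cases hiL : i < rest.length
            · -- an entry carried over from the old queue
              have hidx : ((rest ++ (get_successors s).map (fun x => ((x, a ++ [x]) : MBS × List MBS)))[i]'hi)
                  = rest[i]'hiL := List.getElem_append_left hiL
              rw [hidx] at hnv ⊢
              apply goodpath_foldIns
              have := hent (i + 1) (by simp only [List.length_cons]; omega) ?_ ?_
              · simpa using this
              · simp only [List.getElem_cons_succ]
                by_contra hcon
                rw [Bool.not_eq_false] at hcon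
                exact (bool_tf (set_contains_add_of visited s _ hcon) hnv).elim
              · intro j hj hji
                cases j with
                | zero =>
                  simp only [List.getElem_cons_zero, List.getElem_cons_succ]
                  intro he
                  rw [← he] at hnv
                  exact (bool_tf (set_contains_add_self visited s) hnv).elim
                | succ j' =>
                  simp only [List.getElem_cons_succ]
                  have hj'L : j' < rest.length := by omega
                  have := hjdup j' (by simp only [List.length_append]; omega) (by omega)
                  rw [List.getElem_append_left hj'L, hidx] at this
                  exact this
            · -- a freshly enqueued successor
              replace hiL : rest.length ≤ i := Nat.le_of_not_lt hiL
              have hkM : i - rest.length < ((get_successors s).map (fun x => ((x, a ++ [x]) : MBS × List MBS))).length := by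
                simp only [List.length_append] at hi
                simpa using Nat.sub_lt_left_of_lt_add hiL (by simpa using hi)
              have hidx : ((rest ++ (get_successors s).map (fun x => ((x, a ++ [x]) : MBS × List MBS)))[i]'hi)
                  = ((get_successors s).map (fun x => ((x, a ++ [x]) : MBS × List MBS)))[i - rest.length]'hkM :=
                List.getElem_append_right hiL
              have hkS : i - rest.length < (get_successors s).length := by simpa using hkM
              have hidx2 : ((get_successors s).map (fun x => ((x, a ++ [x]) : MBS × List MBS)))[i - rest.length]'hkM
                  = ((get_successors s)[i - rest.length]'hkS, a ++ [(get_successors s)[i - rest.length]'hkS]) :=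
                List.getElem_map _
              rw [hidx, hidx2] at hnv ⊢
              simp only at hnv ⊢
              set x := (get_successors s)[i - rest.length]'hkS with hxdef
              have hxmem : x ∈ get_successors s := List.getElem_mem hkS
              -- x is not an old key
              have hxnc : came.contains x = false := by
                by_contra hcon
                have hcon' : came.contains x = true := by
                  revert hcon
                  cases came.contains x <;> simp
                rcases hkeys x hcon' with h | h
                · exact (bool_tf (set_contains_add_of visited s x h) hnv).elim
                · rcases List.mem_cons.mp h with he | h
                  · rw [he] at hnv
                    exact (bool_tf (set_contains_add_self visited s) hnv).elim
                  · obtain ⟨⟨y1, y2⟩, hymem, hy1⟩ := List.mem_map.mp h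
                    obtain ⟨j, hj, hyj⟩ := List.mem_iff_getElem.mp hymem
                    have := hjdup j (by simp only [List.length_append]; omega) (by omega)
                    rw [List.getElem_append_left hj, hidx, hidx2, hyj] at this
                    exact this hy1
              -- x is not the initial state
              have hxni : x ≠ init := by
                intro he
                rcases hinitq with h | h
                · rw [he] at hnv
                  exact (bool_tf (set_contains_add_of visited s init h) hnv).elim
                · rcases List.mem_cons.mp h with he2 | h
                  · rw [he, he2] at hnv
                    exact (bool_tf (set_contains_add_self visited s) hnv).elim
                  · obtain ⟨⟨y1, y2⟩, hymem, hy1⟩ := List.mem_map.mp h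
                    obtain ⟨j, hj, hyj⟩ := List.mem_iff_getElem.mp hymem
                    have := hjdup j (by simp only [List.length_append]; omega) (by omega)
                    rw [List.getElem_append_left hj, hidx, hidx2, hyj] at this
                    exact this (hy1.trans he.symm)
              have hget : (foldIns init s (get_successors s) came).get? x = some s :=
                get?_foldIns_new init s x _ came hxmem hxnc hxni
              have hxa : x ∉ a := by
                intro hxa
                have := hgp.2.2 x hxa
                rw [PySem.Dict.contains_eq_isSome_get?] at hxnc
                rw [hxnc] at this
                exact absurd this (by simp)
              refine ⟨Chain.cons hget (chain_foldIns init s _ came hgp.1), ?_, ?_⟩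
              · refine hgp.2.1.append (List.nodup_singleton x) ?_
                intro y hy hy2
                rw [List.mem_singleton] at hy2
                subst hy2
                exact hxa hy
              · intro y hy
                rcases List.mem_append.mp hy with hya | hyx
                · obtain ⟨v, hv'⟩ := Option.isSome_iff_exists.mp (hgp.2.2 y hya)
                  rw [get?_foldIns_of_get init s y v _ came hv']
                  simp
                · simp only [List.mem_singleton] at hyx
                  rw [hyx, hget]
                  simp

-- ===== VERDICT (by name: the statement is the Claim_ definition above) =====
theorem monkey_banana_problem_spec : Claim_equal_monkey_banana_problem := by
  intro i g _
  unfold Spec_monkey_banana_problem monkey_banana_problem monkey_banana_problem_alt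
  have h := bfs_eq g i 1000 [(i, [])] PySem.Dict.empty PySem.Set.empty
  simp only [List.map_cons, List.map_nil] at h
  apply h
  · simp [pysem]
  · intro k hk; simp [pysem] at hk
  · right; simp
  · intro i' hi' _ _
    simp only [List.length_cons, List.length_nil] at hi'
    have : i' = 0 := by omega
    subst this
    exact ⟨Chain.nil, by simp, by simp⟩
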